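-- pv_equiv track=rewrite | github.com/fkie-cad/FACT_core | src/plugins/analysis/filepaths/code/filepaths.py | _remove_duplicate_paths
-- ===== SOURCE A (Python) =====
-- def _remove_duplicate_paths(paths: list[tuple[str, int]]) -> list[str]:
--     """
--     There can be multiple instances of the same path at different offsets, which makes things a bit complicated.
--     """
--     offsets_by_path = {}
--     for path, offset in paths:
--         offsets_by_path.setdefault(path, []).append(offset)
--
--     paths_without_duplicates = set()
--     for path, offsets in offsets_by_path.items():
--         if not all(
--             any(
--                 _paths_overlap(other_path, other_offset, path, offset)
--                 for other_path in set(offsets_by_path) - {path}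
--                 for other_offset in offsets_by_path[other_path]
--             )
--             for offset in offsets
--         ):
--             paths_without_duplicates.add(path)
--     return list(paths_without_duplicates)
--
-- def _paths_overlap(path: str, offset: int, included_path: str, included_offset: int) -> bool:
--     """
--     YARA matches include overlaps like e.g.
--         0 /foo/bar.sh
--         4 /bar.sh
--     We want to find and remove those.
--     """
--     return path.endswith(included_path) and offset == included_offset - (len(path) - len(included_path))
-- ===== SOURCE B (Python) =====
-- def _remove_duplicate_paths(paths: list[tuple[str, int]]) -> list[str]:
--     """
--     Bucket entries by their end position (offset + len(path)): a path occurrence is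
--     suffix-overlapped iff a DIFFERENT path in the same end-position bucket ends with it.
--     """
--     offsets_by_path = {}
--     for path, offset in paths:
--         offsets_by_path.setdefault(path, []).append(offset)
--     buckets = {}
--     for path, offset in paths:
--         buckets.setdefault(offset + len(path), []).append(path)
--     return [
--         path
--         for path, offsets in offsets_by_path.items()
--         if any(
--             not any(other != path and other.endswith(path) for other in buckets[offset + len(path)])
--             for offset in offsets
--         )
--     ]
-- ===== Notes on version B (the rewrite author's own statement) =====
-- stated objective: faster
-- what changed: Instead of testing every path-offset against every other path and all of its offsets (a quadratic all/any scan), B indexes every occurrence by its end position offset+len(path) in one pass and decides suffix-coverage by a lookup in the single matching bucket.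
import Mathlib
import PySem

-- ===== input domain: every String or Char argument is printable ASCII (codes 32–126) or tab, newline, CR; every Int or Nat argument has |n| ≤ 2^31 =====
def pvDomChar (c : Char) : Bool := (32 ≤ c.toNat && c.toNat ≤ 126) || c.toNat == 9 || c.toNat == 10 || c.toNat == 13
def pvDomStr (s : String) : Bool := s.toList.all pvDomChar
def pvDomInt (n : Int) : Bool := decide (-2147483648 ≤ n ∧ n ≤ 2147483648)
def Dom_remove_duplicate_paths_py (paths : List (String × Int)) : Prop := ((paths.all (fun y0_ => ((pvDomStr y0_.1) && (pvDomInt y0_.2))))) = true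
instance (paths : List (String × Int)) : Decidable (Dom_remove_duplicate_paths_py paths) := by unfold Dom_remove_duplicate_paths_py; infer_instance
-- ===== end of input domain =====

-- B replaces A's quadratic all-pairs overlap scan by a one-pass index of occurrences keyed by
-- end position (offset + len(path)); suffix coverage is then decided inside one bucket only.
-- A returns list(set(...)) (hash order): outputs are compared as sets; the ports both list the
-- kept paths in first-occurrence order.

-- ===== PORT A =====
def pv_paths_overlap (path : String) (offset : Int) (included_path : String) (included_offset : Int) : Bool :=
  PySem.Str.endswith path included_path &&
    (offset == included_offset - (PySem.Str.len path - PySem.Str.len included_path))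

def remove_duplicate_paths_py (paths : List (String × Int)) : List String :=
  let offsets_by_path : PySem.Dict String (List Int) :=
    paths.foldl (fun d x => d.modify x.1 [] (· ++ [x.2])) PySem.Dict.empty
  offsets_by_path.items.foldl
    (fun s x =>
      if !(x.2.all (fun off =>
            (PySem.Set.diff (PySem.Set.ofList offsets_by_path.keys) [x.1]).any (fun q =>
              (offsets_by_path.getD q []).any (fun oo => pv_paths_overlap q oo x.1 off))))
      then PySem.Set.add s x.1 else s)
    PySem.Set.empty

-- ===== PORT B =====
def remove_duplicate_paths_py_alt (paths : List (String × Int)) : List String :=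
  let offsets_by_path : PySem.Dict String (List Int) :=
    paths.foldl (fun d x => d.modify x.1 [] (· ++ [x.2])) PySem.Dict.empty
  let buckets : PySem.Dict Int (List String) :=
    paths.foldl (fun d x => d.modify (x.2 + PySem.Str.len x.1) [] (· ++ [x.1])) PySem.Dict.empty
  (offsets_by_path.items.filter (fun x =>
      x.2.any (fun off =>
        !((buckets.getD (off + PySem.Str.len x.1) []).any (fun q =>
            q != x.1 && PySem.Str.endswith q x.1))))).map (·.1)

-- ===== PRECONDITION & SPEC =====
def Spec_remove_duplicate_paths_py (paths : List (String × Int)) (out : List String) : Prop := out = remove_duplicate_paths_py_alt paths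
instance (paths : List (String × Int)) (out : List String) : Decidable (Spec_remove_duplicate_paths_py paths out) := by unfold Spec_remove_duplicate_paths_py; infer_instance

-- ===== CLAIM (what is proved, stated in full; the proofs are below) =====
def Claim_equal_remove_duplicate_paths_py : Prop := ∀ (paths : List (String × Int)), Dom_remove_duplicate_paths_py paths → Spec_remove_duplicate_paths_py paths (remove_duplicate_paths_py paths)

-- ===== LEMMAS AND PROOFS =====

-- the grouping dict both programs build, and B's end-position bucket dict
def pvGrp (paths : List (String × Int)) : PySem.Dict String (List Int) :=
  paths.foldl (fun d x => d.modify x.1 [] (· ++ [x.2])) PySem.Dict.empty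

def pvBkt (paths : List (String × Int)) : PySem.Dict Int (List String) :=
  paths.foldl (fun d x => d.modify (x.2 + PySem.Str.len x.1) [] (· ++ [x.1])) PySem.Dict.empty

lemma pvGrp_getD (paths : List (String × Int)) (q : String) :
    (pvGrp paths).getD q [] = (paths.filter (fun x => x.1 == q)).map (·.2) := by
  simpa [pvGrp] using PySem.Dict.getD_foldl_modify_append paths PySem.Dict.empty q

lemma pvGrp_nodup (paths : List (String × Int)) : (pvGrp paths).keys.Nodup := by
  exact PySem.Dict.nodup_keys_foldl_modify_key paths Prod.fst []
    (fun _ x => (· ++ [x.2])) PySem.Dict.empty (by simp)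

lemma pvGrp_mem_keys (paths : List (String × Int)) (q : String) :
    q ∈ (pvGrp paths).keys ↔ q ∈ paths.map (·.1) := by
  rw [pvGrp, PySem.Dict.keys_foldl_modify_key paths Prod.fst [] (fun _ x => (· ++ [x.2]))]
  rw [show PySem.Set.update (PySem.Dict.empty : PySem.Dict String (List Int)).keys
        (paths.map Prod.fst) = PySem.Set.ofList (paths.map Prod.fst) from rfl]
  simp [PySem.Set.mem_ofList]

lemma pvBkt_mem (paths : List (String × Int)) (e : Int) (q : String) :
    q ∈ (pvBkt paths).getD e [] ↔ ∃ x ∈ paths, x.1 = q ∧ x.2 + PySem.Str.len x.1 = e := by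
  have h := PySem.Dict.getD_foldl_modify_append
    (paths.map (fun x : String × Int => (x.2 + PySem.Str.len x.1, x.1))) PySem.Dict.empty e
  simp only [List.foldl_map] at h
  rw [pvBkt, h]
  simp only [PySem.Dict.getD_empty, List.nil_append, List.filter_map, List.map_map,
    List.mem_map, List.mem_filter, Function.comp, beq_iff_eq]
  constructor
  · rintro ⟨a, ⟨ha, he⟩, rfl⟩
    exact ⟨a, ha, rfl, he⟩
  · rintro ⟨a, ha, rfl, he⟩
    exact ⟨a, ⟨ha, he⟩, rfl⟩

-- the per-occurrence coverage tests of A and B agree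
lemma pv_hit_eq (paths : List (String × Int)) (p : String) (off : Int) :
    ((PySem.Set.diff (PySem.Set.ofList (pvGrp paths).keys) [p]).any (fun q =>
        ((pvGrp paths).getD q []).any (fun oo => pv_paths_overlap q oo p off)))
    = ((pvBkt paths).getD (off + PySem.Str.len p) []).any (fun q =>
        q != p && PySem.Str.endswith q p) := by
  rw [Bool.eq_iff_iff]
  simp only [List.any_eq_true, pv_paths_overlap, Bool.and_eq_true, beq_iff_eq, bne_iff_ne,
    ne_eq]
  constructor
  · rintro ⟨q, hq, oo, hoo, hend, rfl⟩
    have hq' : q ∈ (pvGrp paths).keys ∧ q ≠ p := by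
      simpa [PySem.Set.diff, PySem.Set.mem_ofList] using hq
    rw [pvGrp_getD] at hoo
    simp only [List.mem_map, List.mem_filter, beq_iff_eq] at hoo
    obtain ⟨x, ⟨hx, hx1⟩, hx2⟩ := hoo
    refine ⟨q, ?_, hq'.2, hend⟩
    rw [pvBkt_mem]
    exact ⟨x, hx, hx1, by rw [hx1, hx2]; ring⟩
  · rintro ⟨q, hq, hne, hend⟩
    rw [pvBkt_mem] at hq
    obtain ⟨x, hx, hx1, he⟩ := hq
    refine ⟨q, ?_, x.2, ?_, hend, ?_⟩
    · simp only [PySem.Set.diff]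
      simp [PySem.Set.mem_ofList, (pvGrp_mem_keys paths q).2
        (List.mem_map.2 ⟨x, hx, hx1⟩), hne]
    · rw [pvGrp_getD]
      exact List.mem_map.2 ⟨x, List.mem_filter.2 ⟨hx, by simp [hx1]⟩, rfl⟩
    · rw [hx1] at he; omega

-- A's accumulation into a set: over pairwise-distinct firsts it is filter-then-map
lemma pv_foldl_set_add {α β : Type} [BEq α] [LawfulBEq α]
    (l : List (α × β)) (c : α × β → Bool) (acc : List α)
    (hnd : (l.map Prod.fst).Nodup) (hdisj : ∀ x ∈ l, x.1 ∉ acc) :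
    l.foldl (fun s x => if c x then PySem.Set.add s x.1 else s) acc
      = acc ++ (l.filter c).map Prod.fst := by
  induction l generalizing acc with
  | nil => simp
  | cons y t ih =>
    simp only [List.map_cons, List.nodup_cons] at hnd
    have hy : y.1 ∉ acc := hdisj y (List.mem_cons_self)
    have hadd : PySem.Set.add acc y.1 = acc ++ [y.1] := by
      simp [PySem.Set.add, PySem.Set.contains]
      intro h; exact absurd h hy
    by_cases hc : c y
    · rw [List.foldl_cons, if_pos hc, hadd,
        ih (acc ++ [y.1]) hnd.2 (fun x hx => by
          simp only [List.mem_append, List.mem_singleton]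
          rintro (h | h)
          · exact hdisj x (List.mem_cons_of_mem _ hx) h
          · exact hnd.1 (h ▸ List.mem_map.2 ⟨x, hx, rfl⟩))]
      simp [hc]
    · rw [List.foldl_cons, if_neg (by simp [hc]),
        ih acc hnd.2 (fun x hx => hdisj x (List.mem_cons_of_mem _ hx))]
      simp [hc]

-- ===== VERDICT (by name: the statement is the Claim_ definition above) =====
theorem remove_duplicate_paths_py_spec : Claim_equal_remove_duplicate_paths_py := by
  intro paths _dom
  unfold Spec_remove_duplicate_paths_py remove_duplicate_paths_py remove_duplicate_paths_py_alt
  show (pvGrp paths).items.foldl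
      (fun s x =>
        if !(x.2.all (fun off =>
              (PySem.Set.diff (PySem.Set.ofList (pvGrp paths).keys) [x.1]).any (fun q =>
                ((pvGrp paths).getD q []).any (fun oo => pv_paths_overlap q oo x.1 off))))
        then PySem.Set.add s x.1 else s) PySem.Set.empty
      = ((pvGrp paths).items.filter (fun x =>
          x.2.any (fun off =>
            !(((pvBkt paths).getD (off + PySem.Str.len x.1) []).any (fun q =>
                q != x.1 && PySem.Str.endswith q x.1))))).map (·.1)
  rw [pv_foldl_set_add _ _ _
      (by have := pvGrp_nodup paths
          simpa [PySem.Dict.keys] using this)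
      (by intro x _ h; simp [PySem.Set.empty] at h)]
  have hemp : (PySem.Set.empty : PySem.Set String) = ([] : List String) := rfl
  rw [hemp, List.nil_append]
  congr 1
  apply List.filter_congr
  intro x _
  rw [List.all_eq_not_any_not, Bool.not_not]
  congr 1
  funext off
  rw [pv_hit_eq]
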